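-- pv_equiv track=rewrite | github.com/ammannbros/garden-lighting | garden_lighting/light_control.py | build_lights
-- ===== SOURCE A (Python) =====
-- def build_lights(state, a, b):
--     """
--         :param state False for off, True for on
--         :return: The lights which have the specified state
--     """
--     lights_pattern = a | b << 8
--
--     lights = []
--
--     for i in range(0, 16):
--         # lights_pattern & (1 << i)) == 0 -> OFF
--         # lights_pattern & (1 << i)) != 0 -> ON
--         result = lights_pattern & (1 << i)
--         if (state and result != 0) or (not state and result == 0):
--             lights.append(i)
--
--     return lights
-- ===== SOURCE B (Python) =====
-- # Table-driven: the 16-bit wanted mask is split into four nibbles and each nibble's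
-- # bit positions come from a precomputed 16-entry lookup table, shifted by the nibble offset.
-- _NIBBLE_POSITIONS = (
--     [], [0], [1], [0, 1], [2], [0, 2], [1, 2], [0, 1, 2],
--     [3], [0, 3], [1, 3], [0, 1, 3], [2, 3], [0, 2, 3], [1, 2, 3], [0, 1, 2, 3],
-- )
--
--
-- def build_lights(state, a, b):
--     """
--         :param state False for off, True for on
--         :return: The lights which have the specified state
--     """
--     pattern = (a | b << 8) & 0xFFFF
--     mask = pattern if state else ~pattern & 0xFFFF
--     lights = []
--     for off in (0, 4, 8, 12):
--         lights.extend(off + p for p in _NIBBLE_POSITIONS[(mask >> off) & 0xF])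
--     return lights
-- ===== Notes on version B (the rewrite author's own statement) =====
-- stated objective: alternative
-- what changed: Instead of testing each of the 16 bit positions individually, B builds the wanted 16-bit mask once (the pattern, or its 16-bit complement when state is False), splits it into four nibbles and concatenates the bit-position lists taken from a precomputed 16-entry nibble lookup table, offset by 0/4/8/12.
import Mathlib
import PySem

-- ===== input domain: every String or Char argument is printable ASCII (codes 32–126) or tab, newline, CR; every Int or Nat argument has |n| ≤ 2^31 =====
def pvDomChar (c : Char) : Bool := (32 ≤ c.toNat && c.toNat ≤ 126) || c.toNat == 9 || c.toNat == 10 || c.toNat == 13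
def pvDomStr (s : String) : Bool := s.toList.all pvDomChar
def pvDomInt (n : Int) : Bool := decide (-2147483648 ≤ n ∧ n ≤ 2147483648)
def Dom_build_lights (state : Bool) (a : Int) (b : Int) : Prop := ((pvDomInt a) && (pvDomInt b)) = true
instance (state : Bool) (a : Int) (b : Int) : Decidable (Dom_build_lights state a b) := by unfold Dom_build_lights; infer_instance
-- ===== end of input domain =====

-- B replaces A's per-bit scan of 16 positions by a precomputed nibble lookup table: the wanted
-- 16-bit mask (the pattern, or its 16-bit complement for state = False) is split into four nibbles
-- whose position lists are taken from the table and offset; alternative structure, same cost.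

-- ===== PORT A =====
def build_lights (state : Bool) (a : Int) (b : Int) : List Int :=
  let lights_pattern : Int := PySem.Int.bor a (b <<< (8 : Int))
  (PySem.List.pyRange 0 16).foldl
    (fun lights i =>
      let result : Int := PySem.Int.band lights_pattern ((1 : Int) <<< i)
      if (state && decide (result ≠ 0)) || (!state && decide (result = 0)) then lights ++ [i]
      else lights)
    []

-- ===== PORT B =====
-- Source B's module-level _NIBBLE_POSITIONS table, literally
def pvNibblePositions : List (List Int) :=
  [[], [0], [1], [0, 1], [2], [0, 2], [1, 2], [0, 1, 2],
   [3], [0, 3], [1, 3], [0, 1, 3], [2, 3], [0, 2, 3], [1, 2, 3], [0, 1, 2, 3]]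

def build_lights_alt (state : Bool) (a : Int) (b : Int) : List Int :=
  let pattern : Int := PySem.Int.band (PySem.Int.bor a (b <<< (8 : Int))) 65535
  -- both branches of mask are values of `x & 0xFFFF`, hence nonnegative: .toNat and Nat >>> are exact
  let mask : Nat := (if state then pattern else PySem.Int.band (Int.not pattern) 65535).toNat
  [0, 4, 8, 12].foldl
    (fun lights off =>
      -- the nibble index is always < 16, so the table lookup never misses; getD [] is exact here
      lights ++ (pvNibblePositions.getD ((mask >>> off) &&& 15) []).map (fun p => (off : Int) + p))
    []

-- ===== PRECONDITION & SPEC =====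
def Spec_build_lights (state : Bool) (a : Int) (b : Int) (out : List Int) : Prop := out = build_lights_alt state a b
instance (state : Bool) (a : Int) (b : Int) (out : List Int) : Decidable (Spec_build_lights state a b out) := by unfold Spec_build_lights; infer_instance

-- ===== CLAIM (what is proved, stated in full; the proofs are below) =====
def Claim_equal_build_lights : Prop := ∀ (state : Bool) (a : Int) (b : Int), Dom_build_lights state a b → Spec_build_lights state a b (build_lights state a b)

-- ===== LEMMAS AND PROOFS =====

-- bit j of the Python int p in two's complement, split by sign
def pvBit (p : Int) (j : Nat) : Bool :=
  if 0 ≤ p then p.toNat.testBit j else !((-p - 1).toNat.testBit j)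

lemma pv_and_mod (q : Nat) : q &&& 65535 = q % 65536 := by
  have := Nat.and_two_pow_sub_one_eq_mod q 16
  norm_num at this; omega

lemma pvtn (j : Nat) : ((2 : Int) ^ j).toNat = 2 ^ j := by
  rw [show ((2:Int)^j) = ((2^j : Nat) : Int) by push_cast; ring, Int.toNat_natCast]

-- bits of the 16-bit complement
lemma pv_compl_testBit : ∀ (k m j : Nat), m < 2 ^ k → j < k → (2 ^ k - 1 - m).testBit j = !m.testBit j := by
  intro k
  induction k with
  | zero => intro m j _ hj; omega
  | succ k ih =>
    intro m j hm hj
    have hK : 2 ^ (k + 1) = 2 * 2 ^ k := by ring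
    cases j with
    | zero =>
      rw [Nat.testBit_zero, Nat.testBit_zero]
      by_cases hp : m % 2 = 1 <;> simp [hp] <;> omega
    | succ j =>
      rw [Nat.testBit_succ, Nat.testBit_succ]
      have hdiv : (2 ^ (k + 1) - 1 - m) / 2 = 2 ^ k - 1 - m / 2 := by omega
      rw [hdiv]
      exact ih (m / 2) j (by omega) (by omega)

-- `p & (1 << j)` keeps exactly bit j of p
lemma pv_band_two_pow (p : Int) (j : Nat) :
    PySem.Int.band p ((2 ^ j : Nat) : Int) = ((pvBit p j).toNat * 2 ^ j : Nat) := by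
  unfold PySem.Int.band pvBit
  by_cases hp : 0 ≤ p
  · simp [hp, pvtn, Nat.and_two_pow]
  · simp [hp, pvtn]
    rw [Nat.and_comm, Nat.and_two_pow]
    cases ((-p).toNat - 1).testBit j <;> simp

-- `p & 0xFFFF` is a 16-bit value whose bits are p's low bits
lemma pv_band_mask_toNat (p : Int) :
    (PySem.Int.band p 65535).toNat < 65536 ∧
      (0 ≤ PySem.Int.band p 65535) ∧
      ∀ j < 16, (PySem.Int.band p 65535).toNat.testBit j = pvBit p j := by
  unfold PySem.Int.band pvBit
  by_cases hp : 0 ≤ p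
  · simp only [hp, if_true, if_pos (by norm_num : (0:Int) ≤ 65535)]
    rw [show ((65535:Int).toNat) = 65535 from rfl, pv_and_mod]
    refine ⟨?_, ?_, ?_⟩
    · simp; omega
    · positivity
    · intro j hj
      rw [Int.toNat_natCast, show (65536:Nat) = 2 ^ 16 from by norm_num, Nat.testBit_mod_two_pow]
      simp [hj]
  · simp only [hp, if_false, if_pos (by norm_num : (0:Int) ≤ 65535)]
    rw [show ((65535:Int).toNat) = 65535 from rfl, Nat.and_comm, pv_and_mod]
    refine ⟨?_, ?_, ?_⟩
    · simp; omega
    · positivity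
    · intro j hj
      rw [Int.toNat_natCast]
      rw [show (65535 : Nat) = 2 ^ 16 - 1 from rfl]
      rw [pv_compl_testBit 16 _ j (by omega) hj]
      rw [show (65536:Nat) = 2 ^ 16 from by norm_num, Nat.testBit_mod_two_pow]
      simp [hj]

-- `~pattern & 0xFFFF` is the 16-bit complement
lemma pv_not_mask (N : Nat) (h : N < 65536) :
    (PySem.Int.band (Int.not (N : Int)) 65535).toNat = 65535 - N := by
  have hn : Int.not (N : Int) = -(N : Int) - 1 := by simp [Int.not]; omega
  rw [hn]
  unfold PySem.Int.band
  have hlt : ¬ (0 : Int) ≤ -(N:Int) - 1 := by omega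
  simp only [hlt, if_false, if_pos (by norm_num : (0:Int) ≤ 65535)]
  rw [show ((65535:Int).toNat) = 65535 from rfl]
  rw [show (-(-(N:Int) - 1) - 1).toNat = N by omega]
  rw [Nat.and_comm, pv_and_mod, Nat.mod_eq_of_lt h]
  simp

-- the nibble table lists the set-bit positions of its 4-bit index, as Int
lemma pv_table_eq : ∀ v < 16,
    pvNibblePositions.getD v [] = ((List.range 4).filter v.testBit).map (fun k : Nat => (k : Int)) := by
  decide

-- bit j of nibble k of M is bit 4k+j of M
lemma pv_nib (M c j : Nat) (hj : j < 4) :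
    ((M >>> c) &&& 15).testBit j = M.testBit (c + j) := by
  rw [show (15 : Nat) = 2 ^ 4 - 1 from rfl, Nat.and_two_pow_sub_one_eq_mod,
      Nat.testBit_mod_two_pow, Nat.testBit_shiftRight]
  simp [hj]

-- one chunk of B equals the corresponding slice of A's filtered range
lemma pv_chunk (M c : Nat) :
    (pvNibblePositions.getD ((M >>> c) &&& 15) []).map (fun p => ((c : Nat) : Int) + p)
      = (((List.range 4).map (fun j => c + j)).filter M.testBit).map (fun k : Nat => (k : Int)) := by
  have hfilter : (List.range 4).filter (Nat.testBit ((M >>> c) &&& 15))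
      = (List.range 4).filter (Nat.testBit M ∘ (fun j => c + j)) :=
    List.filter_congr (fun j hj => by
      simp only [Function.comp]
      exact pv_nib M c j (List.mem_range.mp hj))
  rw [pv_table_eq _ (by have := Nat.and_le_right (n := M >>> c) (m := 15); omega),
      List.filter_map, List.map_map, List.map_map, hfilter]
  apply List.map_congr_left
  intro j _
  simp

-- A's fixed 16-position filter is the concatenation of the four nibble chunks
lemma pv_split16 (M : Nat) :
    ((List.range 16).filter M.testBit).map (fun k : Nat => (k : Int))
      = (pvNibblePositions.getD ((M >>> 0) &&& 15) []).map (fun p => (((0 : Nat) : Nat) : Int) + p)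
        ++ (pvNibblePositions.getD ((M >>> 4) &&& 15) []).map (fun p => (((4 : Nat) : Nat) : Int) + p)
        ++ (pvNibblePositions.getD ((M >>> 8) &&& 15) []).map (fun p => (((8 : Nat) : Nat) : Int) + p)
        ++ (pvNibblePositions.getD ((M >>> 12) &&& 15) []).map (fun p => (((12 : Nat) : Nat) : Int) + p) := by
  rw [pv_chunk M 0, pv_chunk M 4, pv_chunk M 8, pv_chunk M 12]
  have hr : List.range 16
      = (List.range 4).map (fun j => 0 + j) ++ (List.range 4).map (fun j => 4 + j)
        ++ (List.range 4).map (fun j => 8 + j) ++ (List.range 4).map (fun j => 12 + j) := by decide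
  rw [hr]
  simp [List.filter_append]

-- ===== VERDICT (by name: the statement is the Claim_ definition above) =====
theorem build_lights_spec : Claim_equal_build_lights := by
  intro state a b _
  unfold Spec_build_lights build_lights build_lights_alt
  simp only []
  set p := PySem.Int.bor a (b <<< (8 : Int)) with hp
  obtain ⟨hlt, hnn, hbits⟩ := pv_band_mask_toNat p
  set N := (PySem.Int.band p 65535).toNat with hN
  have hpatt : PySem.Int.band p 65535 = (N : Int) := (Int.toNat_of_nonneg hnn).symm
  -- A's fold is a filter of range(16)
  rw [PySem.List.foldl_append_if
        (fun i => (state && decide (PySem.Int.band p ((1 : Int) <<< i) ≠ 0))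
          || (!state && decide (PySem.Int.band p ((1 : Int) <<< i) = 0)))
        (fun i => i)]
  rw [show (16 : Int) = ((16 : Nat) : Int) from by norm_num, PySem.List.pyRange_zero_natCast,
      List.filter_map, List.map_map]
  -- B's fold over (0, 4, 8, 12) is the four-chunk concatenation
  cases state with
  | true =>
    rw [if_pos rfl]
    have hpred : ∀ j ∈ List.range 16,
        ((fun i => (true && decide (PySem.Int.band p ((1 : Int) <<< i) ≠ 0))
          || (!true && decide (PySem.Int.band p ((1 : Int) <<< i) = 0))) ∘ (fun k : Nat => (k : Int))) j
          = N.testBit j := by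
      intro j hj
      have hj16 : j < 16 := List.mem_range.mp hj
      simp only [Function.comp, Int.one_shiftLeft, pv_band_two_pow, Bool.true_and, Bool.not_true,
        Bool.false_and, Bool.or_false]
      rw [hbits j hj16]
      cases pvBit p j <;> simp
    rw [List.filter_congr hpred]
    simp only [List.foldl_cons, List.foldl_nil, List.nil_append, Function.comp_def]
    rw [pv_split16 N]
  | false =>
    rw [if_neg (by simp), hpatt, pv_not_mask N hlt]
    have hpred : ∀ j ∈ List.range 16,
        ((fun i => (false && decide (PySem.Int.band p ((1 : Int) <<< i) ≠ 0))
          || (!false && decide (PySem.Int.band p ((1 : Int) <<< i) = 0))) ∘ (fun k : Nat => (k : Int))) j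
          = (65535 - N).testBit j := by
      intro j hj
      have hj16 : j < 16 := List.mem_range.mp hj
      rw [show (65535 : Nat) = 2 ^ 16 - 1 from rfl, pv_compl_testBit 16 N j (by norm_num; omega) hj16]
      simp only [Function.comp, Int.one_shiftLeft, pv_band_two_pow, Bool.false_and, Bool.not_false,
        Bool.true_and, Bool.false_or]
      rw [hbits j hj16]
      cases pvBit p j <;> simp
    rw [List.filter_congr hpred]
    simp only [List.foldl_cons, List.foldl_nil, List.nil_append, Function.comp_def]
    rw [pv_split16 (65535 - N)]
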